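-- pv_equiv track=rewrite | github.com/aesdeef/advent-of-code-2020 | day_24/day_24_lobby_layout.py | flip_tiles
-- ===== SOURCE A (Python) =====
-- def adjacent(tile):
--     """
--     Returns a set of tiles adjacent to the given tile
--     """
--     tile_e, tile_n = tile
--
--     return {
--         (tile_e + 2, tile_n),
--         (tile_e - 2, tile_n),
--         (tile_e + 1, tile_n + 1),
--         (tile_e + 1, tile_n - 1),
--         (tile_e - 1, tile_n + 1),
--         (tile_e - 1, tile_n - 1),
--     }
--
-- def flip_tiles(black_tiles, times=100):
--     """
--     Flips the tiles a given number of times according to the rules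
--     """
--     for _ in range(times):
--         remaining_tiles = {
--             tile for tile in black_tiles if len(adjacent(tile) & black_tiles) in {1, 2}
--         }
--
--         possible_new_tiles = set()
--         for tile in black_tiles:
--             possible_new_tiles |= adjacent(tile)
--         possible_new_tiles -= black_tiles
--
--         new_tiles = {
--             tile
--             for tile in possible_new_tiles
--             if len(adjacent(tile) & black_tiles) == 2
--         }
--
--         black_tiles = remaining_tiles | new_tiles
--
--     return black_tiles
-- ===== SOURCE B (Python) =====
-- def adjacent(tile):
--     """
--     Returns a set of tiles adjacent to the given tile
--     """
--     tile_e, tile_n = tile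
--
--     return {
--         (tile_e + 2, tile_n),
--         (tile_e - 2, tile_n),
--         (tile_e + 1, tile_n + 1),
--         (tile_e + 1, tile_n - 1),
--         (tile_e - 1, tile_n + 1),
--         (tile_e - 1, tile_n - 1),
--     }
--
-- def flip_tiles(black_tiles, times=100):
--     """
--     Flips the tiles a given number of times according to the rules,
--     using one aggregate neighbour-count pass per generation.
--     """
--     for _ in range(times):
--         counts = {}
--         for tile in black_tiles:
--             for neighbour in adjacent(tile):
--                 counts[neighbour] = counts.get(neighbour, 0) + 1
--         candidates = set(counts)
--         candidates -= black_tiles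
--         black_tiles = (
--             {t for t in black_tiles if counts.get(t, 0) in (1, 2)}
--             | {t for t in candidates if counts.get(t, 0) == 2}
--         )
--     return black_tiles
-- ===== Notes on version B (the rewrite author's own statement) =====
-- stated objective: alternative
-- what changed: Each generation makes one aggregate pass that builds a neighbour-count dict from the black tiles and decides survivors and births by count lookups, instead of recomputing a 6-element set intersection for every black tile and every candidate plus a separate union-of-neighbour-sets pass.
import Mathlib
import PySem

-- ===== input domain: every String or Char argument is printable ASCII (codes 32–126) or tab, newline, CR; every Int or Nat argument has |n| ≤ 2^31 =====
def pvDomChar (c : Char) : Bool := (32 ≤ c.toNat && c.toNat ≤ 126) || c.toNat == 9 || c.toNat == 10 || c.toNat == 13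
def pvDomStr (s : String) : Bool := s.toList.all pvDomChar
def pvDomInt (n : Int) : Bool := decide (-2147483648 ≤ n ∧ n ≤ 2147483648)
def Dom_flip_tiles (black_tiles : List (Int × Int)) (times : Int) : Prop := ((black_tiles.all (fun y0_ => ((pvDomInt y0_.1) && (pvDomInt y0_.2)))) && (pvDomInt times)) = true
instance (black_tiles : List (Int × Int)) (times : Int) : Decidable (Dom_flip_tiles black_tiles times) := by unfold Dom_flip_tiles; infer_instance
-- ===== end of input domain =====

-- B replaces A's per-tile set-intersection test (and its union-of-neighbour-sets pass) by ONE
-- aggregate neighbour-count dict per generation; same return value (a set of tiles).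

-- ===== PORT A =====
-- adjacent(tile): a Python set literal of the 6 hex neighbours
def adjacent (tile : Int × Int) : PySem.Set (Int × Int) :=
  PySem.Set.ofList
    [(tile.1 + 2, tile.2), (tile.1 - 2, tile.2),
     (tile.1 + 1, tile.2 + 1), (tile.1 + 1, tile.2 - 1),
     (tile.1 - 1, tile.2 + 1), (tile.1 - 1, tile.2 - 1)]

-- one generation of A's loop body ('len(...) in {1,2}' is 'len == 1 or len == 2')
def flip_step (black_tiles : PySem.Set (Int × Int)) : PySem.Set (Int × Int) :=
  let remaining_tiles := black_tiles.filter (fun tile =>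
    PySem.Set.len (PySem.Set.inter (adjacent tile) black_tiles) == 1 ||
    PySem.Set.len (PySem.Set.inter (adjacent tile) black_tiles) == 2)
  let possible_new_tiles :=
    black_tiles.foldl (fun acc tile => PySem.Set.update acc (adjacent tile)) PySem.Set.empty
  let possible_new_tiles := PySem.Set.diff possible_new_tiles black_tiles
  let new_tiles := possible_new_tiles.filter (fun tile =>
    PySem.Set.len (PySem.Set.inter (adjacent tile) black_tiles) == 2)
  PySem.Set.union remaining_tiles new_tiles

def flip_tiles (black_tiles : List (Int × Int)) (times : Int) : List (Int × Int) :=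
  (PySem.List.pyRange 0 times 1).foldl (fun black _ => flip_step black) black_tiles

-- ===== PORT B =====
-- B's own neighbour helper (the same 6-element set literal)
def adjacent_alt (tile : Int × Int) : PySem.Set (Int × Int) :=
  PySem.Set.ofList
    [(tile.1 + 2, tile.2), (tile.1 - 2, tile.2),
     (tile.1 + 1, tile.2 + 1), (tile.1 + 1, tile.2 - 1),
     (tile.1 - 1, tile.2 + 1), (tile.1 - 1, tile.2 - 1)]

-- one generation of B's loop body: build the neighbour-count dict, then survivors | births
def flip_step_alt (black_tiles : PySem.Set (Int × Int)) : PySem.Set (Int × Int) :=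
  let counts : PySem.Dict (Int × Int) Int :=
    black_tiles.foldl
      (fun d tile => (adjacent_alt tile).foldl (fun d nb => d.modify nb 0 (· + 1)) d)
      PySem.Dict.empty
  let candidates := PySem.Set.diff (PySem.Set.ofList counts.keys) black_tiles
  PySem.Set.union
    (PySem.Set.ofList (black_tiles.filter (fun t =>
      counts.getD t 0 == 1 || counts.getD t 0 == 2)))
    (PySem.Set.ofList (candidates.filter (fun t => counts.getD t 0 == 2)))

def flip_tiles_alt (black_tiles : List (Int × Int)) (times : Int) : List (Int × Int) :=
  (PySem.List.pyRange 0 times 1).foldl (fun black _ => flip_step_alt black) black_tiles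

-- ===== PRECONDITION & SPEC =====
-- Pre_ is the representation invariant of the Python 'set' argument (List T = the DISTINCT
-- elements): a list with duplicates does not denote a set, so nothing is claimed there.
def Pre_flip_tiles (black_tiles : List (Int × Int)) (times : Int) : Prop :=
  black_tiles.Nodup
instance (black_tiles : List (Int × Int)) (times : Int) : Decidable (Pre_flip_tiles black_tiles times) := by unfold Pre_flip_tiles; infer_instance

def pvWitness_flip_tiles : (List (Int × Int)) × Int := ([(0, 0), (2, 0), (1, 1)], 2)

def Spec_flip_tiles (black_tiles : List (Int × Int)) (times : Int) (out : List (Int × Int)) : Prop := out = flip_tiles_alt black_tiles times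
instance (black_tiles : List (Int × Int)) (times : Int) (out : List (Int × Int)) : Decidable (Spec_flip_tiles black_tiles times out) := by unfold Spec_flip_tiles; infer_instance

-- ===== CLAIM (what is proved, stated in full; the proofs are below) =====
def Claim_equal_flip_tiles : Prop := ∀ (black_tiles : List (Int × Int)) (times : Int), Dom_flip_tiles black_tiles times → Pre_flip_tiles black_tiles times → Spec_flip_tiles black_tiles times (flip_tiles black_tiles times)

-- ===== LEMMAS AND PROOFS =====

-- the 6 neighbour offsets as a plain list, and the stream B counts over
def adj6 (e n : Int) : List (Int × Int) :=
  [(e + 2, n), (e - 2, n), (e + 1, n + 1), (e + 1, n - 1), (e - 1, n + 1), (e - 1, n - 1)]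

def nbStream (black : List (Int × Int)) : List (Int × Int) :=
  black.flatMap (fun b => adj6 b.1 b.2)

theorem adj6_nodup (e n : Int) : (adj6 e n).Nodup := by
  simp [adj6, Prod.ext_iff]
  omega

theorem adjacent_eq (t : Int × Int) : adjacent t = adj6 t.1 t.2 :=
  PySem.Set.ofList_eq_self_of_nodup _ (adj6_nodup t.1 t.2)

theorem adjacent_alt_eq (t : Int × Int) : adjacent_alt t = adj6 t.1 t.2 :=
  PySem.Set.ofList_eq_self_of_nodup _ (adj6_nodup t.1 t.2)

theorem adj6_symm (t b : Int × Int) : t ∈ adj6 b.1 b.2 ↔ b ∈ adj6 t.1 t.2 := by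
  simp [adj6, Prod.ext_iff]
  omega

-- |l1 ∩ l2| is symmetric for duplicate-free lists
theorem filter_mem_length_comm (l1 l2 : List (Int × Int))
    (h1 : l1.Nodup) (h2 : l2.Nodup) :
    (l1.filter (fun x => x ∈ l2)).length = (l2.filter (fun x => x ∈ l1)).length := by
  apply List.Perm.length_eq
  apply (List.perm_ext_iff_of_nodup (h1.filter _) (h2.filter _)).mpr
  intro x
  simp [List.mem_filter, and_comm]

-- counting t in the neighbour stream = counting black tiles whose neighbourhood contains t
theorem count_nbStream (black : List (Int × Int)) (t : Int × Int) :
    (nbStream black).count t = (black.filter (fun b => t ∈ adj6 b.1 b.2)).length := by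
  induction black with
  | nil => simp [nbStream]
  | cons b rest ih =>
    have hcnt : (adj6 b.1 b.2).count t = if t ∈ adj6 b.1 b.2 then 1 else 0 := by
      by_cases h : t ∈ adj6 b.1 b.2
      · simp [h, List.count_eq_one_of_mem (adj6_nodup b.1 b.2) h]
      · simp [h, List.count_eq_zero.mpr h]
    by_cases h : t ∈ adj6 b.1 b.2 <;>
      simp [nbStream, List.flatMap_cons, List.count_append, hcnt, h, ih] at *
    omega

-- B's dict is the counter of the neighbour stream
theorem counts_eq_counter (black : List (Int × Int)) :
    black.foldl (fun d tile => (adjacent_alt tile).foldl (fun d nb => d.modify nb 0 (· + 1)) d)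
      PySem.Dict.empty = PySem.Dict.counter (nbStream black) := by
  simp only [adjacent_alt_eq]
  rw [PySem.Dict.counter_eq_foldl, nbStream, List.foldl_flatMap]

-- B's count at t = A's |adjacent(t) ∩ black| (black duplicate-free)
theorem count_eq_lenInter (black : List (Int × Int)) (hnd : black.Nodup) (t : Int × Int) :
    ((PySem.Dict.counter (nbStream black)).getD t 0 : Int) =
      (PySem.Set.len (PySem.Set.inter (adjacent t) black) : Int) := by
  rw [PySem.Dict.getD_counter, count_nbStream]
  have hinter : PySem.Set.inter (adjacent t) black =
      (adj6 t.1 t.2).filter (fun x => decide (x ∈ black)) := by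
    rw [adjacent_eq]; simp [PySem.Set.inter]
  rw [hinter]
  have hsym : (fun b : Int × Int => decide (t ∈ adj6 b.1 b.2)) =
      (fun b : Int × Int => decide (b ∈ adj6 t.1 t.2)) :=
    funext fun b => decide_eq_decide.mpr (adj6_symm t b)
  rw [hsym]
  simp only [PySem.Set.len]
  exact_mod_cast filter_mem_length_comm black (adj6 t.1 t.2) hnd (adj6_nodup t.1 t.2)

-- the union-of-neighbour-sets loop builds set(nbStream black)
theorem possible_eq (black : List (Int × Int)) :
    black.foldl (fun acc tile => PySem.Set.update acc (adjacent tile)) PySem.Set.empty =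
      PySem.Set.ofList (nbStream black) := by
  rw [← PySem.Set.update_nil_left]
  show black.foldl _ ([] : List (Int × Int)) = _
  generalize ([] : List (Int × Int)) = acc
  induction black generalizing acc with
  | nil => simp [nbStream, PySem.Set.update_nil]
  | cons b rest ih =>
    rw [List.foldl_cons, ih, adjacent_eq, ← PySem.Set.update_append]
    simp [nbStream]

-- one generation: A's body = B's body on a duplicate-free set
theorem step_eq (black : List (Int × Int)) (hnd : black.Nodup) :
    flip_step black = flip_step_alt black := by
  have hsurv :
      PySem.Set.ofList (black.filter (fun t =>
        ((PySem.Dict.counter (nbStream black)).getD t 0 == 1) ||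
        ((PySem.Dict.counter (nbStream black)).getD t 0 == 2))) =
      black.filter (fun tile =>
        (PySem.Set.len (PySem.Set.inter (adjacent tile) black) == 1) ||
        (PySem.Set.len (PySem.Set.inter (adjacent tile) black) == 2)) := by
    rw [List.filter_congr (fun t _ => by rw [count_eq_lenInter black hnd t])]
    exact PySem.Set.ofList_eq_self_of_nodup _ (hnd.filter _)
  have hbirth :
      PySem.Set.ofList
        ((PySem.Set.diff (PySem.Set.ofList (PySem.Dict.counter (nbStream black)).keys) black).filter
          (fun t => (PySem.Dict.counter (nbStream black)).getD t 0 == 2)) =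
      (PySem.Set.diff (PySem.Set.ofList (nbStream black)) black).filter (fun tile =>
        PySem.Set.len (PySem.Set.inter (adjacent tile) black) == 2) := by
    rw [PySem.Dict.keys_counter, PySem.Set.ofList_ofList]
    rw [List.filter_congr (fun t _ => by rw [count_eq_lenInter black hnd t])]
    exact PySem.Set.ofList_eq_self_of_nodup _
      ((PySem.Set.nodup_diff _ _ (PySem.Set.nodup_ofList (nbStream black))).filter _)
  simp only [flip_step, flip_step_alt]
  rw [counts_eq_counter, possible_eq, hsurv, hbirth]

-- A's body keeps the set duplicate-free
theorem step_nodup (black : List (Int × Int)) (hnd : black.Nodup) :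
    (flip_step black).Nodup := by
  unfold flip_step
  exact PySem.Set.nodup_update _ _ (hnd.filter _)

-- the generation loop: A = B along any number of generations
theorem loop_eq (l : List Int) (black : List (Int × Int)) (hnd : black.Nodup) :
    l.foldl (fun black _ => flip_step black) black =
      l.foldl (fun black _ => flip_step_alt black) black := by
  induction l generalizing black with
  | nil => rfl
  | cons x rest ih =>
    simp only [List.foldl_cons]
    rw [← step_eq black hnd]
    exact ih (flip_step black) (step_nodup black hnd)

-- ===== VERDICT (by name: the statement is the Claim_ definition above) =====
theorem flip_tiles_spec : Claim_equal_flip_tiles := by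
  intro black_tiles times _hdom hpre
  unfold Spec_flip_tiles flip_tiles flip_tiles_alt
  exact loop_eq _ black_tiles hpre
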